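-- pv_equiv track=rewrite | github.com/daniel-reich/turbo-robot | hZ4HzhboCJ5dDiNve_8.py | special_reverse_string
-- ===== SOURCE A (Python) =====
-- def special_reverse_string(txt):
--   char_stream = filter(lambda c:not c.isspace(), reversed(txt))
--   out = []
--   for c in txt:
--     out_c = None
--     if c.isspace():
--       out_c = c
--     else:
--       out_c = next(char_stream)
--       out_c = out_c.upper() if c.isupper() else out_c.lower()
--     out.append(out_c)
--   return ''.join(out)
-- ===== SOURCE B (Python) =====
-- def special_reverse_string(txt):
--     # converging two-end loop: peel chars off both ends, swapping the non-space
--     # ends and leaving spaces in place; then reapply the original casing by position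
--     left, right = [], []
--     cs = list(txt)
--     while len(cs) > 1:
--         if cs[0].isspace():
--             left.append(cs[0])
--             cs = cs[1:]
--         elif cs[-1].isspace():
--             right.append(cs[-1])
--             cs = cs[:-1]
--         else:
--             left.append(cs[-1])
--             right.append(cs[0])
--             cs = cs[1:-1]
--     rev = left + cs + right[::-1]
--     return ''.join(
--         c if c.isspace() else (r.upper() if c.isupper() else r.lower())
--         for c, r in zip(txt, rev)
--     )
-- ===== Notes on version B (the rewrite author's own statement) =====
-- stated objective: alternative
-- what changed: Replaced A's single forward pass that consumes characters from a reversed-filtered stream with a converging two-end loop (classic reverse-only-non-space peeling with left/right accumulators) followed by a positional case-reapplication zip.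
import Mathlib
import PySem

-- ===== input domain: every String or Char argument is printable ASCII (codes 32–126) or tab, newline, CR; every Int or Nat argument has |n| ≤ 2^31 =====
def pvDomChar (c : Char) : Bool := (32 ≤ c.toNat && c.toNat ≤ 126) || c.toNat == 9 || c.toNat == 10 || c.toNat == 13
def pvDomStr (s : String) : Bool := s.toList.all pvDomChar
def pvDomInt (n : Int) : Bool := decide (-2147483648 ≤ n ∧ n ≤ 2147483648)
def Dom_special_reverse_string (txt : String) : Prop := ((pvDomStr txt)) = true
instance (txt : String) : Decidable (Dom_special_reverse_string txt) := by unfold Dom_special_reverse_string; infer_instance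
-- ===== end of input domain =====

-- B replaces A's forward consume-from-reversed-stream pass by a converging two-end
-- swap recursion plus a positional case-reapplication zip (alternative decomposition, not faster).


-- ===== PORT A =====
-- the for-loop of A: walk txt, copy spaces, otherwise take the next char of the
-- reversed-filtered stream `rs` and recase it by the current char
def pvFillA : List Char → List Char → List Char
  | [], _ => []
  | c :: t, rs =>
      if PySem.Chars.isspace c then c :: pvFillA t rs
      else
        match rs with
        | r :: rs' =>
            (if PySem.Chars.isupper c then PySem.Chars.upperChar r else PySem.Chars.lowerChar r)
              :: pvFillA t rs'
        | [] => []  -- next() would raise StopIteration here; unreachable: the stream holds exactly one char per non-space char of txt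

def special_reverse_string (txt : String) : String :=
  String.mk (pvFillA txt.toList ((txt.toList.reverse).filter (fun c => !PySem.Chars.isspace c)))

-- ===== PORT B =====
-- the while loop of Source B: state (cs, left, right); peel from both ends of cs
def pvLoop : List Char → List Char → List Char → List Char
  | [], left, right => left ++ [] ++ right.reverse
  | [c], left, right => left ++ [c] ++ right.reverse
  | c :: d :: t, left, right =>
      if PySem.Chars.isspace c then
        pvLoop (d :: t) (left ++ [c]) right
      else
        if PySem.Chars.isspace ((d :: t).getLast (by simp)) then
          pvLoop (c :: (d :: t).dropLast) left (right ++ [(d :: t).getLast (by simp)])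
        else
          pvLoop ((d :: t).dropLast) (left ++ [(d :: t).getLast (by simp)]) (right ++ [c])
  termination_by cs => cs.length
  decreasing_by all_goals (simp [List.length_dropLast]; try omega)

def special_reverse_string_alt (txt : String) : String :=
  String.mk (List.zipWith
    (fun c r => if PySem.Chars.isspace c then c
                else if PySem.Chars.isupper c then PySem.Chars.upperChar r else PySem.Chars.lowerChar r)
    txt.toList (pvLoop txt.toList [] []))

-- ===== PRECONDITION & SPEC =====
def Spec_special_reverse_string (txt : String) (out : String) : Prop := out = special_reverse_string_alt txt
instance (txt : String) (out : String) : Decidable (Spec_special_reverse_string txt out) := by unfold Spec_special_reverse_string; infer_instance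

-- ===== CLAIM (what is proved, stated in full; the proofs are below) =====
def Claim_equal_special_reverse_string : Prop := ∀ (txt : String), Dom_special_reverse_string txt → Spec_special_reverse_string txt (special_reverse_string txt)

-- ===== LEMMAS AND PROOFS =====

-- proof-side helper: the converging two-end reversal as a plain structural value (pvLoop without accumulators)
def pvSrev : List Char → List Char
  | [] => []
  | [c] => [c]
  | c :: d :: t =>
      if PySem.Chars.isspace c then
        c :: pvSrev (d :: t)
      else
        if PySem.Chars.isspace ((d :: t).getLast (by simp)) then
          pvSrev (c :: (d :: t).dropLast) ++ [(d :: t).getLast (by simp)]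
        else
          ((d :: t).getLast (by simp)) :: pvSrev ((d :: t).dropLast) ++ [c]
  termination_by cs => cs.length
  decreasing_by all_goals (simp [List.length_dropLast]; try omega)


theorem pvLoop_eq (n : Nat) : ∀ (cs left right : List Char), cs.length = n →
    pvLoop cs left right = left ++ pvSrev cs ++ right.reverse := by
  induction n using Nat.strong_induction_on with
  | _ n ih =>
    intro cs left right hn
    match cs with
    | [] => simp [pvLoop, pvSrev]
    | [c] => simp [pvLoop, pvSrev]
    | c :: d :: t =>
        have hn2 : t.length + 2 = n := by simpa using hn
        by_cases hc : PySem.Chars.isspace c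
        · rw [pvLoop]
          simp only [hc, if_pos]
          rw [ih (d :: t).length (by simp; omega) _ _ _ rfl]
          rw [pvSrev]; simp [hc]
        · by_cases hbs : PySem.Chars.isspace ((d :: t).getLast (by simp))
          · rw [pvLoop]
            simp only [hc, Bool.false_eq_true, not_false_iff, if_neg, hbs, if_pos]
            rw [ih (c :: (d :: t).dropLast).length (by simp [List.length_dropLast]; omega) _ _ _ rfl]
            rw [pvSrev]
            simp only [hc, Bool.false_eq_true, not_false_iff, if_neg, hbs, if_pos]
            simp
          · rw [pvLoop]
            simp only [hc, Bool.false_eq_true, not_false_iff, if_neg, hbs, if_pos]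
            rw [ih ((d :: t).dropLast).length (by simp [List.length_dropLast]; omega) _ _ _ rfl]
            rw [pvSrev]
            simp only [hc, Bool.false_eq_true, not_false_iff, if_neg, hbs, if_pos]
            simp

-- caseless fill: the char-moving part of A's loop, casing stripped out
def pvFill : List Char → List Char → List Char
  | [], _ => []
  | c :: t, rs =>
      if PySem.Chars.isspace c then c :: pvFill t rs
      else
        match rs with
        | r :: rs' => r :: pvFill t rs'
        | [] => []

def pvCase (c r : Char) : Char :=
  if PySem.Chars.isspace c then c
  else if PySem.Chars.isupper c then PySem.Chars.upperChar r else PySem.Chars.lowerChar r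

theorem pvFillA_eq_zip (cs : List Char) : ∀ rs, pvFillA cs rs = List.zipWith pvCase cs (pvFill cs rs) := by
  induction cs with
  | nil => intro rs; simp [pvFillA, pvFill]
  | cons c t ih =>
      intro rs
      by_cases hs : PySem.Chars.isspace c
      · simp [pvFillA, pvFill, hs, pvCase, ih]
      · cases rs with
        | nil => simp [pvFillA, pvFill, hs]
        | cons r rs' => simp [pvFillA, pvFill, hs, pvCase, ih]

def pvCnt (xs : List Char) : Nat := (xs.filter (fun c => !PySem.Chars.isspace c)).length

theorem pvFill_append (xs : List Char) : ∀ (ys rs : List Char), pvCnt xs ≤ rs.length →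
    pvFill (xs ++ ys) rs = pvFill xs (rs.take (pvCnt xs)) ++ pvFill ys (rs.drop (pvCnt xs)) := by
  induction xs with
  | nil => intro ys rs _; simp [pvFill, pvCnt]
  | cons x t ih =>
      intro ys rs h
      by_cases hs : PySem.Chars.isspace x
      · have hc : pvCnt (x :: t) = pvCnt t := by simp [pvCnt, hs]
        rw [hc] at h ⊢
        simp only [List.cons_append]
        rw [show pvFill (x :: (t ++ ys)) rs = x :: pvFill (t ++ ys) rs by simp [pvFill, hs]]
        rw [show pvFill (x :: t) (rs.take (pvCnt t)) = x :: pvFill t (rs.take (pvCnt t)) by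
          simp [pvFill, hs]]
        rw [ih _ _ h]
        simp
      · have hc : pvCnt (x :: t) = pvCnt t + 1 := by simp [pvCnt, hs]
        cases rs with
        | nil => rw [hc] at h; simp at h
        | cons r rs' =>
            have h' : pvCnt t ≤ rs'.length := by simp [hc] at h; omega
            simp only [List.cons_append, pvFill, hs, if_neg, hc]
            simp only [List.take_succ_cons, List.drop_succ_cons, pvFill, hs, if_neg]
            simp [ih _ _ h']

theorem pvCnt_rev_filter (xs : List Char) :
    ((xs.reverse).filter (fun c => !PySem.Chars.isspace c)).length = pvCnt xs := by
  simp [pvCnt, List.filter_reverse]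

theorem pvFill_srev (n : Nat) : ∀ cs : List Char, cs.length = n →
    pvFill cs ((cs.reverse).filter (fun c => !PySem.Chars.isspace c)) = pvSrev cs := by
  induction n using Nat.strong_induction_on with
  | _ n ih =>
    intro cs hn
    match cs with
    | [] => simp [pvFill, pvSrev]
    | [c] =>
        by_cases hs : PySem.Chars.isspace c <;> simp [pvFill, pvSrev, hs]
    | c :: d :: t =>
        have hn2 : t.length + 2 = n := by simpa using hn
        set l := d :: t with hl
        have hlne : l ≠ [] := by simp [hl]
        set b := l.getLast hlne with hb
        set m := l.dropLast with hm
        have hsplit : l = m ++ [b] := (List.dropLast_append_getLast hlne).symm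
        have hrev : (c :: l).reverse = b :: m.reverse ++ [c] := by
          rw [hsplit]; simp
        have hlenm : m.length = t.length := by simp [hm, hl]
        by_cases hc : PySem.Chars.isspace c
        · -- first char is a space
          have ihl : pvFill l ((l.reverse).filter (fun c => !PySem.Chars.isspace c)) = pvSrev l := by
            refine ih l.length ?_ l rfl
            simp [hl]; omega
          have : ((c :: l).reverse.filter (fun c => !PySem.Chars.isspace c))
              = (l.reverse.filter (fun c => !PySem.Chars.isspace c)) := by
            simp [hc]
          rw [this]
          rw [show pvFill (c :: l) ((l.reverse).filter (fun c => !PySem.Chars.isspace c))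
              = c :: pvFill l ((l.reverse).filter (fun c => !PySem.Chars.isspace c)) by
            simp [pvFill, hc]]
          rw [ihl, hl]
          rw [pvSrev]; simp [hc]
        · by_cases hbs : PySem.Chars.isspace b
          · -- last char is a space
            have hfr : ((c :: l).reverse.filter (fun c => !PySem.Chars.isspace c))
                = ((c :: m).reverse.filter (fun c => !PySem.Chars.isspace c)) := by
              rw [hrev]; simp [hbs, hc]
            have hihm : pvFill (c :: m) (((c :: m).reverse).filter (fun c => !PySem.Chars.isspace c)) = pvSrev (c :: m) := by
              refine ih (c :: m).length ?_ _ rfl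
              simp [hlenm]; omega
            have hlen : pvCnt (c :: m) ≤ (((c :: m).reverse).filter (fun c => !PySem.Chars.isspace c)).length := by
              rw [pvCnt_rev_filter]
            have hsplit2 : c :: l = (c :: m) ++ [b] := by rw [hsplit]; simp
            rw [hfr, hsplit2, pvFill_append _ _ _ hlen]
            have hfull : (((c :: m).reverse).filter (fun c => !PySem.Chars.isspace c)).take (pvCnt (c :: m))
                = ((c :: m).reverse).filter (fun c => !PySem.Chars.isspace c) := by
              rw [← pvCnt_rev_filter]; exact List.take_length
            have hdrop : (((c :: m).reverse).filter (fun c => !PySem.Chars.isspace c)).drop (pvCnt (c :: m)) = [] := by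
              rw [← pvCnt_rev_filter]; exact List.drop_length
            rw [hfull, hdrop, hihm]
            have : pvFill [b] [] = [b] := by simp [pvFill, hbs]
            rw [this, show (c :: m) ++ [b] = c :: l by simp [hsplit], hl]
            rw [pvSrev]
            simp only [hc, Bool.false_eq_true, not_false_iff, if_neg]
            have hgl : (d :: t).getLast (by simp) = b := rfl
            have hdl : (d :: t).dropLast = m := rfl
            rw [hgl, hdl]
            simp [hbs]
          · -- both end chars non-space
            have hfr : ((c :: l).reverse.filter (fun c => !PySem.Chars.isspace c))
                = b :: (m.reverse.filter (fun c => !PySem.Chars.isspace c)) ++ [c] := by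
              rw [hrev]; simp [hbs, hc]
            have hsplit2 : c :: l = c :: m ++ [b] := by rw [hsplit]; rfl
            rw [hfr, hsplit2]
            rw [show pvFill (c :: m ++ [b]) (b :: (m.reverse.filter (fun c => !PySem.Chars.isspace c)) ++ [c])
                = b :: pvFill (m ++ [b]) ((m.reverse.filter (fun c => !PySem.Chars.isspace c)) ++ [c]) by
              simp [pvFill, hc]]
            have hlen : pvCnt m ≤ ((m.reverse.filter (fun c => !PySem.Chars.isspace c)) ++ [c]).length := by
              simp [← pvCnt_rev_filter]
            rw [pvFill_append _ _ _ hlen]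
            have hclen : (m.reverse.filter (fun c => !PySem.Chars.isspace c)).length = pvCnt m :=
              pvCnt_rev_filter m
            have htake : ((m.reverse.filter (fun c => !PySem.Chars.isspace c)) ++ [c]).take (pvCnt m)
                = m.reverse.filter (fun c => !PySem.Chars.isspace c) := by
              rw [← hclen]; exact List.take_left
            have hdrop : ((m.reverse.filter (fun c => !PySem.Chars.isspace c)) ++ [c]).drop (pvCnt m) = [c] := by
              rw [← hclen]; exact List.drop_left
            rw [htake, hdrop]
            have hihm : pvFill m ((m.reverse).filter (fun c => !PySem.Chars.isspace c)) = pvSrev m := by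
              refine ih m.length ?_ _ rfl
              simp [hlenm]; omega
            rw [hihm]
            have : pvFill [b] [c] = [c] := by simp [pvFill, hbs]
            rw [this]
            have hback : c :: m ++ [b] = c :: l := by rw [hsplit]; simp
            rw [hback, hl]
            rw [pvSrev]
            simp only [hc, Bool.false_eq_true, not_false_iff, if_neg]
            have hgl : (d :: t).getLast (by simp) = b := rfl
            have hdl : (d :: t).dropLast = m := rfl
            rw [hgl, hdl]
            simp [hbs]

-- ===== VERDICT (by name: the statement is the Claim_ definition above) =====
theorem special_reverse_string_spec : Claim_equal_special_reverse_string := by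
  intro txt _
  unfold Spec_special_reverse_string special_reverse_string special_reverse_string_alt
  rw [pvFillA_eq_zip, pvFill_srev txt.toList.length txt.toList rfl,
      pvLoop_eq txt.toList.length txt.toList [] [] rfl]
  unfold pvCase
  simp
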